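-- pv_equiv track=rewrite | github.com/cleo-cyber/datastructures-python | Hackerank/array.py | arrayChallenge
-- ===== SOURCE A (Python) =====
-- def arrayChallenge(arr):
--     result = []
--     for i in range(len(arr)):
--         counter = 0
--         for j in range(i):
--             counter += abs(arr[i]-arr[j])
--         result.append(counter)
--     return result
-- ===== SOURCE B (Python) =====
-- from bisect import bisect_left, insort
--
-- def arrayChallenge(arr):
--     # Keep the seen prefix in a sorted list; for each value split it at the
--     # insertion point and use rank/partial-sum arithmetic instead of per-element abs.
--     result = []
--     pre = []          # sorted copy of the elements seen so far
--     total = 0         # sum of pre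
--     for v in arr:
--         pos = bisect_left(pre, v)
--         s_less = sum(pre[:pos])
--         result.append(v * pos - s_less + (total - s_less) - v * (len(pre) - pos))
--         insort(pre, v)
--         total += v
--     return result
-- ===== Notes on version B (the rewrite author's own statement) =====
-- stated objective: faster
-- what changed: Replaces A's per-index inner loop of abs differences by a sorted prefix list (bisect/insort) split at the insertion point, computing each entry from the rank and the partial sums of the two halves.
import Mathlib
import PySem

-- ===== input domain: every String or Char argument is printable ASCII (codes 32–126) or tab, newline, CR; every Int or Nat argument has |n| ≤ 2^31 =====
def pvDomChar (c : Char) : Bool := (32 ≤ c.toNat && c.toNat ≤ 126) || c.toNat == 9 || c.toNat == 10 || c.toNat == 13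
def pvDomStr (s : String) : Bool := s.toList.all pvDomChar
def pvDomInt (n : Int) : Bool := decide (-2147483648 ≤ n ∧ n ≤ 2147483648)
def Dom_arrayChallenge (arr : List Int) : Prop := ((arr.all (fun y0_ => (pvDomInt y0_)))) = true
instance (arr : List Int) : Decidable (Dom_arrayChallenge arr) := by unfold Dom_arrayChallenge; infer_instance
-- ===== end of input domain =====

-- B replaces A's per-element abs-diff inner loop by a sorted prefix list split at the
-- insertion point, computing each entry from rank and partial sums (constant-factor faster).

-- ===== PORT A =====
def arrayChallenge (arr : List Int) : List Int :=
  (PySem.List.pyRange 0 (arr.length : Int) 1).foldl (fun result i =>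
    result ++ [(PySem.List.pyRange 0 i 1).foldl (fun counter j =>
      counter + |PySem.List.pyGetD arr i 0 - PySem.List.pyGetD arr j 0|) 0]) []

-- ===== PORT B =====
-- bisect.bisect_left — exact on sorted lists, the only lists B applies it to
def pvBisectLeft (l : List Int) (v : Int) : Nat :=
  (l.takeWhile (fun x => x < v)).length

-- bisect.insort — exact on sorted lists, the only lists B applies it to
def pvInsort (l : List Int) (v : Int) : List Int :=
  let pos := pvBisectLeft l v
  l.take pos ++ v :: l.drop pos

def arrayChallengeAltGo (pre : List Int) (total : Int) (result : List Int) :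
    List Int → List Int
  | [] => result
  | v :: rest =>
    let pos := pvBisectLeft pre v
    let sLess := (pre.take pos).foldl (· + ·) 0
    let c := v * (pos : Int) - sLess + (total - sLess) - v * ((pre.length : Int) - (pos : Int))
    arrayChallengeAltGo (pvInsort pre v) (total + v) (result ++ [c]) rest

def arrayChallenge_alt (arr : List Int) : List Int :=
  arrayChallengeAltGo [] 0 [] arr

-- ===== PRECONDITION & SPEC =====
def Spec_arrayChallenge (arr : List Int) (out : List Int) : Prop := out = arrayChallenge_alt arr
instance (arr : List Int) (out : List Int) : Decidable (Spec_arrayChallenge arr out) := by unfold Spec_arrayChallenge; infer_instance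

-- ===== CLAIM (what is proved, stated in full; the proofs are below) =====
def Claim_equal_arrayChallenge : Prop := ∀ (arr : List Int), Dom_arrayChallenge arr → Spec_arrayChallenge arr (arrayChallenge arr)

-- ===== LEMMAS AND PROOFS =====

-- reference recursion: prefix carried explicitly, each entry the sum of |v - x| over the prefix
def pvSpecGo (pre : List Int) : List Int → List Int
  | [] => []
  | v :: rest => (pre.map (fun x => |v - x|)).sum :: pvSpecGo (pre ++ [v]) rest

-- ---- A = pvSpecGo ----

theorem pv_map_range_getD (arr : List Int) :
    ∀ i : Nat, i ≤ arr.length →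
      (List.range i).map (fun j => arr.getD j 0) = arr.take i := by
  intro i
  induction i with
  | zero => simp
  | succ k ih =>
    intro h
    have hk : k < arr.length := by omega
    rw [List.range_succ, List.map_append, ih (by omega), List.take_succ]
    simp [List.getD_eq_getElem?_getD, List.getElem?_eq_getElem hk]

theorem pvSpecGo_eq_map_range :
    ∀ (l pre : List Int),
      pvSpecGo pre l =
        (List.range l.length).map
          (fun i => ((pre ++ l.take i).map (fun x => |l.getD i 0 - x|)).sum) := by
  intro l
  induction l with
  | nil => simp [pvSpecGo]
  | cons v rest ih =>
    intro pre
    rw [pvSpecGo, List.length_cons, List.range_succ_eq_map, List.map_cons, List.map_map]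
    simp only [List.take_zero, List.append_nil, List.getD_cons_zero]
    congr 1
    rw [ih (pre ++ [v])]
    apply List.map_congr_left
    intro i _
    simp [List.append_assoc]

theorem pv_A_eq_specGo (arr : List Int) : arrayChallenge arr = pvSpecGo [] arr := by
  unfold arrayChallenge
  rw [PySem.List.pyRange_zero_nat, List.foldl_map, PySem.List.foldl_append_singleton_eq_map,
    List.nil_append, pvSpecGo_eq_map_range]
  apply List.map_congr_left
  intro i hi
  rw [List.mem_range] at hi
  rw [PySem.List.pyRange_zero_nat, List.foldl_map, PySem.List.foldl_add, Int.zero_add]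
  rw [List.nil_append, ← pv_map_range_getD arr i (by omega), List.map_map]
  congr 1
  apply List.map_congr_left
  intro j _
  simp

-- ---- B = pvSpecGo ----

theorem pv_foldl_add_eq_sum (l : List Int) : ∀ a : Int, l.foldl (· + ·) a = a + l.sum := by
  induction l with
  | nil => simp
  | cons x t ih => intro a; simp [List.foldl_cons, ih, add_assoc]

theorem pv_mem_dropWhile_le {v : Int} :
    ∀ {l : List Int}, l.Sorted (· ≤ ·) →
      ∀ {x : Int}, x ∈ l.dropWhile (fun y => y < v) → v ≤ x := by
  intro l
  induction l with
  | nil => intro _ x hx; simp [List.dropWhile] at hx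
  | cons a t ih =>
    intro hs x hx
    rw [List.dropWhile_cons] at hx
    by_cases ha : a < v
    · simp only [ha, decide_true, if_true] at hx
      exact ih hs.of_cons hx
    · simp only [ha, decide_false] at hx
      rcases List.mem_cons.mp hx with rfl | hxt
      · omega
      · have := (List.sorted_cons.mp hs).1 x hxt
        omega

theorem pv_sum_abs_lt {v : Int} :
    ∀ {l : List Int}, (∀ x ∈ l, x < v) →
      (l.map (fun x => |v - x|)).sum = v * (l.length : Int) - l.sum := by
  intro l
  induction l with
  | nil => simp
  | cons a t ih =>
    intro h
    have ha : a < v := h a (by simp)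
    rw [List.map_cons, List.sum_cons, ih (fun x hx => h x (by simp [hx]))]
    rw [abs_of_nonneg (by omega : (0:Int) ≤ v - a)]
    simp [List.sum_cons]
    ring

theorem pv_sum_abs_ge {v : Int} :
    ∀ {l : List Int}, (∀ x ∈ l, v ≤ x) →
      (l.map (fun x => |v - x|)).sum = l.sum - v * (l.length : Int) := by
  intro l
  induction l with
  | nil => simp
  | cons a t ih =>
    intro h
    have ha : v ≤ a := h a (by simp)
    rw [List.map_cons, List.sum_cons, ih (fun x hx => h x (by simp [hx]))]
    rw [abs_of_nonpos (by omega : v - a ≤ (0:Int))]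
    simp [List.sum_cons]
    ring

-- the split value computed from rank/partial sums equals the abs-diff sum over a sorted list
theorem pv_counter_eq (preS : List Int) (v : Int) (hs : preS.Sorted (· ≤ ·)) :
    v * ((pvBisectLeft preS v : Nat) : Int) - ((preS.take (pvBisectLeft preS v)).foldl (· + ·) 0)
      + (preS.sum - ((preS.take (pvBisectLeft preS v)).foldl (· + ·) 0))
      - v * ((preS.length : Int) - ((pvBisectLeft preS v : Nat) : Int))
      = (preS.map (fun x => |v - x|)).sum := by
  set T := preS.takeWhile (fun x => x < v) with hT
  set D := preS.dropWhile (fun x => x < v) with hD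
  have hTD : T ++ D = preS := List.takeWhile_append_dropWhile
  have htake : preS.take (pvBisectLeft preS v) = T := by
    rw [pvBisectLeft, ← hT]
    exact (List.prefix_iff_eq_take.mp (List.takeWhile_prefix _)).symm
  have hTlt : ∀ x ∈ T, x < v := by
    intro x hx
    have := List.mem_takeWhile_imp hx
    simpa using this
  have hDge : ∀ x ∈ D, v ≤ x := fun x hx => pv_mem_dropWhile_le hs hx
  have hpos : pvBisectLeft preS v = T.length := by rw [pvBisectLeft, ← hT]
  have hlen : preS.length = T.length + D.length := by rw [← hTD]; simp
  have hsum : preS.sum = T.sum + D.sum := by rw [← hTD]; simp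
  rw [htake, pv_foldl_add_eq_sum, hpos, hlen, hsum, ← hTD]
  rw [List.map_append, List.sum_append, pv_sum_abs_lt hTlt, pv_sum_abs_ge hDge]
  push_cast
  ring

theorem pv_insort_perm (l : List Int) (v : Int) : (pvInsort l v).Perm (v :: l) := by
  rw [pvInsort, pvBisectLeft]
  have htake : l.take (l.takeWhile (fun x => x < v)).length = l.takeWhile (fun x => x < v) :=
    (List.prefix_iff_eq_take.mp (List.takeWhile_prefix _)).symm
  have hdrop : l.drop (l.takeWhile (fun x => x < v)).length = l.dropWhile (fun x => x < v) := by
    have h := congrArg (List.drop (l.takeWhile (fun x => x < v)).length)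
      (List.takeWhile_append_dropWhile (p := fun x => decide (x < v)) (l := l))
    rw [List.drop_left] at h
    exact h.symm
  rw [htake, hdrop]
  have h : (l.takeWhile (fun x => x < v) ++ v :: l.dropWhile (fun x => x < v)).Perm
      (v :: (l.takeWhile (fun x => x < v) ++ l.dropWhile (fun x => x < v))) := List.perm_middle
  rw [List.takeWhile_append_dropWhile] at h
  exact h

theorem pv_insort_sorted (l : List Int) (v : Int) (hs : l.Sorted (· ≤ ·)) :
    (pvInsort l v).Sorted (· ≤ ·) := by
  rw [pvInsort, pvBisectLeft]
  have htake : l.take (l.takeWhile (fun x => x < v)).length = l.takeWhile (fun x => x < v) :=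
    (List.prefix_iff_eq_take.mp (List.takeWhile_prefix _)).symm
  have hdrop : l.drop (l.takeWhile (fun x => x < v)).length = l.dropWhile (fun x => x < v) := by
    have h := congrArg (List.drop (l.takeWhile (fun x => x < v)).length)
      (List.takeWhile_append_dropWhile (p := fun x => decide (x < v)) (l := l))
    rw [List.drop_left] at h
    exact h.symm
  rw [htake, hdrop]
  have hsTD : (l.takeWhile (fun x => x < v) ++ l.dropWhile (fun x => x < v)).Sorted (· ≤ ·) := by
    rw [List.takeWhile_append_dropWhile]; exact hs
  rw [List.Sorted, List.pairwise_append] at hsTD ⊢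
  obtain ⟨hT, hDp, hTD⟩ := hsTD
  refine ⟨hT, ?_, ?_⟩
  · rw [List.pairwise_cons]
    exact ⟨fun x hx => pv_mem_dropWhile_le hs hx, hDp⟩
  · intro a ha b hb
    have hav : a < v := by simpa using List.mem_takeWhile_imp ha
    rcases List.mem_cons.mp hb with rfl | hbD
    · omega
    · have := pv_mem_dropWhile_le hs hbD
      omega

theorem pv_altGo_eq_specGo :
    ∀ (l pre preS res : List Int), preS.Perm pre → preS.Sorted (· ≤ ·) →
      arrayChallengeAltGo preS preS.sum res l = res ++ pvSpecGo pre l := by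
  intro l
  induction l with
  | nil => intro pre preS res _ _; simp [arrayChallengeAltGo, pvSpecGo]
  | cons v rest ih =>
    intro pre preS res hperm hs
    rw [arrayChallengeAltGo, pvSpecGo]
    have hc : v * ((pvBisectLeft preS v : Nat) : Int)
        - ((preS.take (pvBisectLeft preS v)).foldl (· + ·) 0)
        + (preS.sum - ((preS.take (pvBisectLeft preS v)).foldl (· + ·) 0))
        - v * ((preS.length : Int) - ((pvBisectLeft preS v : Nat) : Int))
        = (pre.map (fun x => |v - x|)).sum := by
      rw [pv_counter_eq preS v hs]
      exact (hperm.map _).sum_eq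
    have hperm' : (pvInsort preS v).Perm (pre ++ [v]) :=
      ((pv_insort_perm preS v).trans (hperm.cons v)).trans
        (List.perm_append_singleton v pre).symm
    have hsum : preS.sum + v = (pvInsort preS v).sum := by
      rw [(pv_insort_perm preS v).sum_eq, List.sum_cons]; ring
    rw [hsum, ih (pre ++ [v]) (pvInsort preS v) (res ++ [_]) hperm'
      (pv_insort_sorted preS v hs)]
    rw [List.append_assoc, List.singleton_append, hc]

theorem pv_B_eq_specGo (arr : List Int) : arrayChallenge_alt arr = pvSpecGo [] arr := by
  have h := pv_altGo_eq_specGo arr [] [] [] (List.Perm.refl []) List.Pairwise.nil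
  rw [List.sum_nil, List.nil_append] at h
  rw [arrayChallenge_alt, h]

-- ===== VERDICT (by name: the statement is the Claim_ definition above) =====
theorem arrayChallenge_spec : Claim_equal_arrayChallenge := by
  intro arr _
  unfold Spec_arrayChallenge
  rw [pv_A_eq_specGo, pv_B_eq_specGo]
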